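-- pv_equiv track=rewrite | github.com/wbopan/gepa | src/gepa/examples/nyt_connections.py | _count_correct_groups
-- ===== SOURCE A (Python) =====
-- def _count_correct_groups(
--     predicted: list[set[str]], answer: list[set[str]]
-- ) -> int:
--     """Count how many predicted groups exactly match answer groups."""
--     correct = 0
--     used_answers = set()
--     for pred in predicted:
--         for i, ans in enumerate(answer):
--             if i in used_answers:
--                 continue
--             if pred == ans:
--                 correct += 1
--                 used_answers.add(i)
--                 break
--     return correct
-- ===== SOURCE B (Python) =====
-- def _count_correct_groups(
--     predicted: list[set[str]], answer: list[set[str]]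
-- ) -> int:
--     """Count how many predicted groups exactly match answer groups."""
--     ans_counts = {}
--     for g in answer:
--         k = frozenset(g)
--         ans_counts[k] = ans_counts.get(k, 0) + 1
--     correct = 0
--     for g in predicted:
--         k = frozenset(g)
--         if ans_counts.get(k, 0) > 0:
--             ans_counts[k] -= 1
--             correct += 1
--     return correct
-- ===== Notes on version B (the rewrite author's own statement) =====
-- stated objective: alternative
-- what changed: Replaces the nested greedy scan over answer with a used-index set by a frozenset-keyed count dictionary built once over answer and then decremented in a single pass over predicted.
import Mathlib
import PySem

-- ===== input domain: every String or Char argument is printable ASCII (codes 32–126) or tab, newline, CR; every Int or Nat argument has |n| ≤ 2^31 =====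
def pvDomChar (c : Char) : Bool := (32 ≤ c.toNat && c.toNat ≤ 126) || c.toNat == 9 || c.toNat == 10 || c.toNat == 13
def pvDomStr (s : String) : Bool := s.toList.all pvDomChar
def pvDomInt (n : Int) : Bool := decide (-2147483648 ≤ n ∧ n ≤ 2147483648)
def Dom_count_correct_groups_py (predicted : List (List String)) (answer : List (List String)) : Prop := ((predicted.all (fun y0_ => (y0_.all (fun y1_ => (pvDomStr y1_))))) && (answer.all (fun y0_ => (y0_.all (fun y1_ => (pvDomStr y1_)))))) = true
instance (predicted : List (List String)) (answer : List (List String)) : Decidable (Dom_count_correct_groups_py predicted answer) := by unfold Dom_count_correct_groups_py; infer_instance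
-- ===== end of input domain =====

-- B replaces A's nested greedy scan with a used-index set by a frozenset-keyed count
-- dictionary built once over answer and decremented in one pass over predicted (alternative algorithm, same measured cost).

-- ===== PORT A =====
-- inner loop of A: 'for i, ans in enumerate(answer): if i in used: continue;
-- if pred == ans: … break' — returns the matched index, if any; the groups arrive
-- as Python sets built from the lists, so '==' is Set.equal on Set.ofList
def pvFindA (pred : List String) (anss : List (List String)) (i : Nat) (used : PySem.Set Nat) : Option Nat :=
  match anss with
  | [] => none
  | a :: rest =>
    if PySem.Set.contains used i then pvFindA pred rest (i + 1) used
    else if PySem.Set.equal (PySem.Set.ofList pred) (PySem.Set.ofList a) then some i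
    else pvFindA pred rest (i + 1) used

def count_correct_groups_py (predicted : List (List String)) (answer : List (List String)) : Int :=
  (predicted.foldl
    (fun (st : Int × PySem.Set Nat) pred =>
      match pvFindA pred answer 0 st.2 with
      | some i => (st.1 + 1, PySem.Set.add st.2 i)
      | none => st)
    ((0 : Int), (PySem.Set.empty : PySem.Set Nat))).1

-- ===== PORT B =====
-- frozenset(g) modelled by a canonical representative: the sorted list of g's
-- distinct elements (two groups get the same key exactly when equal as Python sets)
def pvKey (g : List String) : List String :=
  PySem.List.sorted (PySem.Set.ofList g) (fun x => x) false

def count_correct_groups_py_alt (predicted : List (List String)) (answer : List (List String)) : Int :=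
  let ans_counts : PySem.Dict (List String) Int :=
    answer.foldl (fun d g => d.insert (pvKey g) (d.getD (pvKey g) 0 + 1)) PySem.Dict.empty
  (predicted.foldl
    (fun (st : Int × PySem.Dict (List String) Int) g =>
      let k := pvKey g
      if st.2.getD k 0 > 0 then (st.1 + 1, st.2.insert k (st.2.getD k 0 - 1)) else st)
    ((0 : Int), ans_counts)).1

-- ===== PRECONDITION & SPEC =====
def Spec_count_correct_groups_py (predicted : List (List String)) (answer : List (List String)) (out : Int) : Prop := out = count_correct_groups_py_alt predicted answer
instance (predicted : List (List String)) (answer : List (List String)) (out : Int) : Decidable (Spec_count_correct_groups_py predicted answer out) := by unfold Spec_count_correct_groups_py; infer_instance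

-- ===== CLAIM (what is proved, stated in full; the proofs are below) =====
def Claim_equal_count_correct_groups_py : Prop := ∀ (predicted : List (List String)) (answer : List (List String)), Dom_count_correct_groups_py predicted answer → Spec_count_correct_groups_py predicted answer (count_correct_groups_py predicted answer)

-- ===== LEMMAS AND PROOFS =====

-- keys of the answer entries (numbered from i) whose index is not in 'used'
def pvRem (anss : List (List String)) (i : Nat) (used : PySem.Set Nat) : List (List String) :=
  match anss with
  | [] => []
  | a :: rest =>
    if PySem.Set.contains used i then pvRem rest (i + 1) used
    else pvKey a :: pvRem rest (i + 1) used
theorem pvKey_eq_iff (p q : List String) :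
    pvKey p = pvKey q ↔ PySem.Set.equal (PySem.Set.ofList p) (PySem.Set.ofList q) = true := by
  rw [pvKey, pvKey, PySem.List.sorted_id_eq_sorted_id_iff_perm, PySem.Set.equal_iff,
    List.perm_ext_iff_of_nodup (PySem.Set.nodup_ofList p) (PySem.Set.nodup_ofList q)]

theorem pvFindA_none_iff (pred : List String) (anss : List (List String)) (i : Nat)
    (used : PySem.Set Nat) :
    pvFindA pred anss i used = none ↔ (pvRem anss i used).count (pvKey pred) = 0 := by
  induction anss generalizing i with
  | nil => simp [pvFindA, pvRem]
  | cons a rest ih =>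
    rw [pvFindA, pvRem]
    by_cases hc : i ∈ used
    · simp only [PySem.Set.contains_iff, hc, if_true]
      exact ih (i + 1)
    · simp only [PySem.Set.contains_iff, hc, if_false]
      by_cases he : PySem.Set.equal (PySem.Set.ofList pred) (PySem.Set.ofList a) = true
      · have hk : pvKey pred = pvKey a := (pvKey_eq_iff _ _).mpr he
        simp [he, hk]
      · have hk : pvKey pred ≠ pvKey a := fun h => he ((pvKey_eq_iff _ _).mp h)
        simp only [he]
        rw [List.count_cons]
        simp [hk.symm, ih]

theorem pvFindA_some_ge (pred : List String) (anss : List (List String)) (i : Nat)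
    (used : PySem.Set Nat) (j : Nat) (h : pvFindA pred anss i used = some j) : i ≤ j := by
  induction anss generalizing i with
  | nil => simp [pvFindA] at h
  | cons a rest ih =>
    rw [pvFindA] at h
    by_cases hc : i ∈ used
    · simp only [PySem.Set.contains_iff, hc, if_true] at h
      exact Nat.le_of_succ_le (ih (i + 1) h)
    · simp only [PySem.Set.contains_iff, hc, if_false] at h
      by_cases he : PySem.Set.equal (PySem.Set.ofList pred) (PySem.Set.ofList a) = true
      · simp [he] at h; omega
      · simp only [he] at h
        exact Nat.le_of_succ_le (ih (i + 1) h)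

theorem pvRem_add_lt (anss : List (List String)) (i j : Nat) (used : PySem.Set Nat)
    (h : j < i) : pvRem anss i (PySem.Set.add used j) = pvRem anss i used := by
  induction anss generalizing i with
  | nil => rfl
  | cons a rest ih =>
    have hm : (i ∈ PySem.Set.add used j) ↔ i ∈ used := by
      rw [PySem.Set.mem_add]
      constructor
      · rintro (hx | rfl)
        · exact hx
        · exact (Nat.lt_irrefl _ h).elim
      · exact Or.inl
    rw [pvRem, pvRem]
    simp only [PySem.Set.contains_iff, hm]
    by_cases hcu : i ∈ used
    · rw [if_pos hcu, if_pos hcu, ih _ (by omega)]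
    · rw [if_neg hcu, if_neg hcu, ih _ (by omega)]

theorem pvFindA_some (pred : List String) (anss : List (List String)) (i : Nat)
    (used : PySem.Set Nat) (j : Nat) (h : pvFindA pred anss i used = some j) :
    pvRem anss i (PySem.Set.add used j) = (pvRem anss i used).erase (pvKey pred) := by
  induction anss generalizing i with
  | nil => simp [pvFindA] at h
  | cons a rest ih =>
    rw [pvFindA] at h
    by_cases hc : i ∈ used
    · have hc' : i ∈ PySem.Set.add used j := by rw [PySem.Set.mem_add]; exact Or.inl hc
      simp only [PySem.Set.contains_iff, hc, if_true] at h
      rw [pvRem, pvRem]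
      simp only [PySem.Set.contains_iff, hc', hc, if_true]
      exact ih (i + 1) h
    · simp only [PySem.Set.contains_iff, hc, if_false] at h
      by_cases he : PySem.Set.equal (PySem.Set.ofList pred) (PySem.Set.ofList a) = true
      · simp only [he, if_true, Option.some.injEq] at h
        subst h
        have hc' : i ∈ PySem.Set.add used i := by rw [PySem.Set.mem_add]; exact Or.inr rfl
        have hk : pvKey pred = pvKey a := (pvKey_eq_iff _ _).mpr he
        rw [pvRem, pvRem]
        simp only [PySem.Set.contains_iff, hc', hc, if_true, if_false]
        rw [pvRem_add_lt _ _ _ _ (by omega), hk, List.erase_cons_head]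
      · simp only [he] at h
        have hj : i + 1 ≤ j := pvFindA_some_ge pred rest (i + 1) used j h
        have hc' : i ∉ PySem.Set.add used j := by
          rw [PySem.Set.mem_add]
          rintro (hx | rfl)
          · exact hc hx
          · omega
        have hk : pvKey a ≠ pvKey pred := fun hkk =>
          he ((pvKey_eq_iff pred a).mp hkk.symm)
        rw [pvRem, pvRem]
        simp only [PySem.Set.contains_iff, hc', hc, if_false]
        rw [List.erase_cons_tail (by simpa using hk), ih (i + 1) h]

theorem pvRem_empty (anss : List (List String)) (i : Nat) :
    pvRem anss i PySem.Set.empty = anss.map pvKey := by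
  induction anss generalizing i with
  | nil => rfl
  | cons a rest ih =>
    rw [pvRem, List.map_cons, if_neg (by simp [PySem.Set.empty]), ih]

theorem pvLoop (answer : List (List String)) (preds : List (List String))
    (used : PySem.Set Nat) (d : PySem.Dict (List String) Int) (c : Int)
    (hinv : ∀ v, d.getD v 0 = ((pvRem answer 0 used).count v : Int)) :
    (preds.foldl
      (fun (st : Int × PySem.Set Nat) pred =>
        match pvFindA pred answer 0 st.2 with
        | some i => (st.1 + 1, PySem.Set.add st.2 i)
        | none => st) (c, used)).1
    = (preds.foldl
      (fun (st : Int × PySem.Dict (List String) Int) g =>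
        let k := pvKey g
        if st.2.getD k 0 > 0 then (st.1 + 1, st.2.insert k (st.2.getD k 0 - 1)) else st)
      (c, d)).1 := by
  induction preds generalizing used d c with
  | nil => rfl
  | cons pred rest ih =>
    simp only [List.foldl_cons]
    cases hf : pvFindA pred answer 0 used with
    | none =>
      have hcnt : (pvRem answer 0 used).count (pvKey pred) = 0 :=
        (pvFindA_none_iff pred answer 0 used).mp hf
      have hd : d.getD (pvKey pred) 0 = 0 := by rw [hinv, hcnt]; rfl
      simp only [hd]
      rw [if_neg (by omega)]
      exact ih used d c hinv
    | some j =>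
      have hcnt : (pvRem answer 0 used).count (pvKey pred) ≠ 0 := by
        intro h0
        rw [(pvFindA_none_iff pred answer 0 used).mpr h0] at hf
        cases hf
      have hd : d.getD (pvKey pred) 0 > 0 := by
        rw [hinv]; exact_mod_cast Nat.pos_of_ne_zero hcnt
      rw [if_pos hd]
      apply ih
      intro v
      rw [PySem.Dict.getD_insert, pvFindA_some pred answer 0 used j hf]
      by_cases hv : v = pvKey pred
      · subst hv
        rw [if_pos rfl, hinv, List.count_erase_self]
        have hpos := Nat.pos_of_ne_zero hcnt
        omega
      · rw [if_neg hv, hinv, List.count_erase_of_ne hv]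

theorem count_correct_groups_py_spec : Claim_equal_count_correct_groups_py := by
  intro predicted answer _
  unfold Spec_count_correct_groups_py
  show count_correct_groups_py predicted answer = count_correct_groups_py_alt predicted answer
  unfold count_correct_groups_py count_correct_groups_py_alt
  apply pvLoop
  intro v
  rw [pvRem_empty]
  have hfold : answer.foldl (fun d g => d.insert (pvKey g) (d.getD (pvKey g) 0 + 1)) (PySem.Dict.empty : PySem.Dict (List String) Int)
      = (answer.map pvKey).foldl (fun d x => d.insert x (d.getD x 0 + 1)) PySem.Dict.empty := by
    rw [List.foldl_map]
  rw [hfold, PySem.Dict.foldl_insert_getD_add_one_eq_counter, PySem.Dict.getD_counter]
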